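-- pv_equiv track=rewrite | github.com/bavocadob/TIL | 99_algorithm/BOJ/39weeks/1930.py | solve
-- ===== SOURCE A (Python) =====
-- face_mapping_a = [1, 0, 0, 0]
--
-- face_mapping_b = [2, 3, 1, 2]
--
-- face_mapping_c = [3, 2, 3, 1]
--
-- def rotate_face(face):
--     return face[1:] + face[:1]
--
-- def solve(a, b):
--     for i in range(4):
--         base_1 = a[i]
--         sides_1 = [
--             a[face_mapping_a[i]],
--             a[face_mapping_b[i]],
--             a[face_mapping_c[i]]
--         ]
--
--         for j in range(4):
--             base_2 = b[j]
--             sides_2 = [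
--                 b[face_mapping_a[j]],
--                 b[face_mapping_b[j]],
--                 b[face_mapping_c[j]]
--             ]
--
--             if base_1 == base_2:
--                 for _ in range(3):
--                     if sides_1 == sides_2:
--                         return 1
--                     sides_2 = rotate_face(sides_2)
--
--     return 0
-- ===== SOURCE B (Python) =====
-- def canon(v):
--     w, x, y, z = v[0], v[1], v[2], v[3]
--     best = None
--     for (p, q, r, s) in ((w, x, y, z), (x, w, z, y), (y, w, x, z), (z, w, y, x)):
--         for _ in range(3):
--             t = (p, q, r, s)
--             if best is None or t < best:
--                 best = t
--             q, r, s = r, s, q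
--     return best
--
-- def solve(a, b):
--     # Tetrahedra match under rotation iff their canonical (lexicographically
--     # minimal) orientations coincide: the 12 orientations form one orbit of A4.
--     return 1 if canon(a) == canon(b) else 0
-- ===== Notes on version B (the rewrite author's own statement) =====
-- stated objective: alternative
-- what changed: Replaces A's exhaustive pairwise orientation search by a canonical-form comparison: each tetrahedron is reduced to the lexicographically minimal of its 12 rotational orientations (one A4-orbit) and the two canonical tuples are compared for equality.
import Mathlib
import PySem

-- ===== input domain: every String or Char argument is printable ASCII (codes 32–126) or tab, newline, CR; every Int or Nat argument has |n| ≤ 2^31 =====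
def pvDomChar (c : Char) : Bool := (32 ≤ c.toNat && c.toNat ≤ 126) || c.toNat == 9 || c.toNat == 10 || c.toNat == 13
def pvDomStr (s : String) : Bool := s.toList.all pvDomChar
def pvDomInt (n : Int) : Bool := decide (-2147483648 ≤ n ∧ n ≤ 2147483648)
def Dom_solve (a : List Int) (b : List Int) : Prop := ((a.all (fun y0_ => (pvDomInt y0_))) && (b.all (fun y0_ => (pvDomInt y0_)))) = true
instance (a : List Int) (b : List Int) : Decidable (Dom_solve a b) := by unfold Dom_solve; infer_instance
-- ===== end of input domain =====

-- B replaces A's exhaustive pairwise search by a canonical form: each tetrahedron is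
-- reduced to the lexicographically minimal of its 12 rotational orientations and the
-- two canonical tuples are compared (objective: alternative algorithm, same cost).

-- ===== PORT A =====
def face_mapping_a : List Int := [1, 0, 0, 0]
def face_mapping_b : List Int := [2, 3, 1, 2]
def face_mapping_c : List Int := [3, 2, 3, 1]

-- xs[i]; Pre_solve keeps every index that either program uses in range, so the
-- default 0 of getD is never read on admitted inputs (pyGet? none = IndexError).
def pvIdx (xs : List Int) (i : Int) : Int := (PySem.List.pyGet? xs i).getD 0

-- the side-triple [xs[fa[i]], xs[fb[i]], xs[fc[i]]] of A
def pvSides (xs : List Int) (i : Int) : List Int :=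
  [pvIdx xs (pvIdx face_mapping_a i), pvIdx xs (pvIdx face_mapping_b i), pvIdx xs (pvIdx face_mapping_c i)]

def rotate_face (face : List Int) : List Int :=
  PySem.List.slice face (some 1) none ++ PySem.List.slice face none (some 1)

-- A's innermost 'for _ in range(3)' loop with early return
def solveRot : Nat → List Int → List Int → Bool
  | 0, _, _ => false
  | n + 1, s1, s2 => if s1 == s2 then true else solveRot n s1 (rotate_face s2)

def solve (a : List Int) (b : List Int) : Int :=
  if (PySem.List.pyRange 0 4 1).any (fun i =>
      let base1 := pvIdx a i
      let s1 := pvSides a i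
      (PySem.List.pyRange 0 4 1).any (fun j =>
        let base2 := pvIdx b j
        let s2 := pvSides b j
        base1 == base2 && solveRot 3 s1 s2))
  then 1 else 0

-- ===== PORT B =====
-- Python tuple '<' on int 4-tuples (lexicographic), ported by hand; exact for int entries.
def lt4 (t u : Int × Int × Int × Int) : Bool :=
  decide (t.1 < u.1 ∨ (t.1 = u.1 ∧ (t.2.1 < u.2.1 ∨ (t.2.1 = u.2.1 ∧
    (t.2.2.1 < u.2.2.1 ∨ (t.2.2.1 = u.2.2.1 ∧ t.2.2.2 < u.2.2.2))))))

-- 'if best is None or t < best: best = t'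
def canonStep (best : Option (Int × Int × Int × Int)) (t : Int × Int × Int × Int) :
    Option (Int × Int × Int × Int) :=
  match best with
  | none => some t
  | some m => if lt4 t m then some t else some m

-- the inner 'for _ in range(3)' loop: state (best, q, r, s), then 'q, r, s = r, s, q'
def canonGroup (best : Option (Int × Int × Int × Int)) (p q r s : Int) :
    Option (Int × Int × Int × Int) :=
  ((List.range 3).foldl
    (fun st _ => (canonStep st.1 (p, st.2.1, st.2.2.1, st.2.2.2), st.2.2.1, st.2.2.2, st.2.1))
    (best, q, r, s)).1

def canon (v : List Int) : Option (Int × Int × Int × Int) :=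
  let w := pvIdx v 0
  let x := pvIdx v 1
  let y := pvIdx v 2
  let z := pvIdx v 3
  ([(w,x,y,z), (x,w,z,y), (y,w,x,z), (z,w,y,x)] : List (Int × Int × Int × Int)).foldl
    (fun best g => canonGroup best g.1 g.2.1 g.2.2.1 g.2.2.2) none

def solve_alt (a : List Int) (b : List Int) : Int :=
  if canon a = canon b then 1 else 0

-- ===== PRECONDITION & SPEC =====
-- A raises IndexError when either list has fewer than 4 elements; Pre_ excludes exactly those.
def Pre_solve (a : List Int) (b : List Int) : Prop := 4 ≤ a.length ∧ 4 ≤ b.length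
instance (a : List Int) (b : List Int) : Decidable (Pre_solve a b) := by unfold Pre_solve; infer_instance
def pvWitness_solve : List Int × List Int := ([1, 2, 3, 4], [4, 3, 2, 1])

def Spec_solve (a : List Int) (b : List Int) (out : Int) : Prop := out = solve_alt a b
instance (a : List Int) (b : List Int) (out : Int) : Decidable (Spec_solve a b out) := by unfold Spec_solve; infer_instance

-- ===== CLAIM (what is proved, stated in full; the proofs are below) =====
def Claim_equal_solve : Prop := ∀ (a : List Int) (b : List Int), Dom_solve a b → Pre_solve a b → Spec_solve a b (solve a b)

-- ===== LEMMAS AND PROOFS =====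

-- the 12 rotational orientations (base, sides) of the tetrahedron (w, x, y, z),
-- grouped by base in A's order; B's canon enumerates exactly this list.
def Elist (w x y z : Int) : List (Int × Int × Int × Int) :=
  [(w,x,y,z), (w,y,z,x), (w,z,x,y),
   (x,w,z,y), (x,z,y,w), (x,y,w,z),
   (y,w,x,z), (y,x,z,w), (y,z,w,x),
   (z,w,y,x), (z,y,x,w), (z,x,w,y)]

-- order facts about lt4
lemma lt4_irrefl (t : Int × Int × Int × Int) : lt4 t t = false := by
  obtain ⟨a, b, c, d⟩ := t; simp [lt4]
lemma lt4_trans {t u v : Int × Int × Int × Int} (h1 : lt4 t u = true) (h2 : lt4 u v = true) :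
    lt4 t v = true := by
  obtain ⟨a, b, c, d⟩ := t; obtain ⟨e, f, g, h⟩ := u; obtain ⟨i, j, k, l⟩ := v
  simp [lt4] at *; omega
lemma lt4_antisymm {t u : Int × Int × Int × Int} (h1 : lt4 t u = false) (h2 : lt4 u t = false) :
    t = u := by
  obtain ⟨a, b, c, d⟩ := t; obtain ⟨e, f, g, h⟩ := u
  simp [lt4, Prod.mk.injEq] at *; omega
lemma lt4_total {t u : Int × Int × Int × Int} (h : lt4 t u = false) : t = u ∨ lt4 u t = true := by
  obtain ⟨a, b, c, d⟩ := t; obtain ⟨e, f, g, h⟩ := u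
  simp [lt4, Prod.mk.injEq] at *; omega

def minFold (L : List (Int × Int × Int × Int)) : Option (Int × Int × Int × Int) :=
  L.foldl canonStep none

lemma minFold_go (L : List (Int × Int × Int × Int)) (m0 : Int × Int × Int × Int) :
    ∃ m, L.foldl canonStep (some m0) = some m ∧ (m = m0 ∨ m ∈ L) ∧
      (∀ t, (t = m0 ∨ t ∈ L) → lt4 t m = false) := by
  induction L generalizing m0 with
  | nil =>
    refine ⟨m0, rfl, Or.inl rfl, ?_⟩
    rintro t (rfl | h)
    · exact lt4_irrefl t
    · simp at h
  | cons h tl ih =>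
    simp only [List.foldl_cons, canonStep]
    by_cases hlt : lt4 h m0 = true
    · rw [if_pos hlt]
      obtain ⟨m, hm, hmem, hmin⟩ := ih h
      refine ⟨m, hm, ?_, ?_⟩
      · rcases hmem with rfl | hmem
        · exact Or.inr (List.mem_cons_self)
        · exact Or.inr (List.mem_cons_of_mem _ hmem)
      · rintro t (rfl | ht)
        · -- t = m0 : from ¬ lt4 h m and lt4 h m0, m0 < m would give h < m
          have hh := hmin h (Or.inl rfl)
          by_contra hc
          simp only [Bool.not_eq_false] at hc
          exact absurd (lt4_trans hlt hc) (by simp [hh])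
        · rcases List.mem_cons.mp ht with rfl | ht
          · exact hmin t (Or.inl rfl)
          · exact hmin t (Or.inr ht)
    · simp only [Bool.not_eq_true] at hlt
      rw [if_neg (by simp [hlt])]
      obtain ⟨m, hm, hmem, hmin⟩ := ih m0
      refine ⟨m, hm, ?_, ?_⟩
      · rcases hmem with rfl | hmem
        · exact Or.inl rfl
        · exact Or.inr (List.mem_cons_of_mem _ hmem)
      · rintro t (rfl | ht)
        · exact hmin t (Or.inl rfl)
        · rcases List.mem_cons.mp ht with rfl | ht
          · -- t = h, m0 ≤ h
            have hm0 := hmin m0 (Or.inl rfl)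
            by_contra hc
            simp only [Bool.not_eq_false] at hc
            rcases lt4_total hlt with rfl | hlt'
            · simp [hm0] at hc
            · exact absurd (lt4_trans hlt' hc) (by simp [hm0])
          · exact hmin t (Or.inr ht)

lemma minFold_spec (h : Int × Int × Int × Int) (L : List (Int × Int × Int × Int)) :
    ∃ m, minFold (h :: L) = some m ∧ m ∈ h :: L ∧ ∀ t ∈ h :: L, lt4 t m = false := by
  obtain ⟨m, hm, hmem, hmin⟩ := minFold_go L h
  refine ⟨m, hm, ?_, ?_⟩
  · rcases hmem with rfl | hmem
    · exact List.mem_cons_self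
    · exact List.mem_cons_of_mem _ hmem
  · intro t ht
    rcases List.mem_cons.mp ht with rfl | ht
    · exact hmin t (Or.inl rfl)
    · exact hmin t (Or.inr ht)

-- the four base orientations (r = 0) appearing on A's side, and in B's outer loop
def Base4 (w x y z : Int) : List (Int × Int × Int × Int) :=
  [(w,x,y,z), (x,w,z,y), (y,w,x,z), (z,w,y,x)]

-- B's canon is the fold of canonStep over exactly the 12 orientations
lemma canon_eq (v : List Int) :
    canon v = minFold (Elist (pvIdx v 0) (pvIdx v 1) (pvIdx v 2) (pvIdx v 3)) := by
  simp only [canon, canonGroup, minFold, Elist, List.range_succ, List.range_zero,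
    List.foldl_cons, List.foldl_nil, List.foldl_append]

lemma minE_spec (w x y z : Int) :
    ∃ m, minFold (Elist w x y z) = some m ∧ m ∈ Elist w x y z ∧
      ∀ t ∈ Elist w x y z, lt4 t m = false := minFold_spec _ _

lemma minFold_congr {w x y z w' x' y' z' : Int}
    (h : ∀ u, u ∈ Elist w x y z ↔ u ∈ Elist w' x' y' z') :
    minFold (Elist w x y z) = minFold (Elist w' x' y' z') := by
  obtain ⟨m1, e1, hm1, hmin1⟩ := minE_spec w x y z
  obtain ⟨m2, e2, hm2, hmin2⟩ := minE_spec w' x' y' z'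
  rw [e1, e2, lt4_antisymm (hmin2 m1 ((h m1).mp hm1)) (hmin1 m2 ((h m2).mpr hm2))]

def rotS (t : Int × Int × Int × Int) : Int × Int × Int × Int := (t.1, t.2.2.1, t.2.2.2, t.2.1)

lemma rotS_mem {w x y z : Int} {t : Int × Int × Int × Int} (ht : t ∈ Elist w x y z) :
    rotS t ∈ Elist w x y z := by
  simp only [Elist, List.mem_cons, List.not_mem_nil, or_false] at ht ⊢
  rcases ht with rfl|rfl|rfl|rfl|rfl|rfl|rfl|rfl|rfl|rfl|rfl|rfl <;> simp [rotS]

lemma base4_subset {w x y z : Int} {t : Int × Int × Int × Int} (ht : t ∈ Base4 w x y z) :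
    t ∈ Elist w x y z := by
  simp only [Base4, Elist, List.mem_cons, List.not_mem_nil, or_false] at ht ⊢
  tauto

-- the orbit of any orientation t of (w,x,y,z) stays inside the orientation list (A4 closure)
lemma orbit_subset {w x y z : Int} {t : Int × Int × Int × Int} (ht : t ∈ Elist w x y z) :
    ∀ u ∈ Elist t.1 t.2.1 t.2.2.1 t.2.2.2, u ∈ Elist w x y z := by
  simp only [Elist, List.mem_cons, List.not_mem_nil, or_false] at ht
  rcases ht with rfl|rfl|rfl|rfl|rfl|rfl|rfl|rfl|rfl|rfl|rfl|rfl <;>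
    (intro u hu
     simp only [Elist, List.mem_cons, List.not_mem_nil, or_false] at hu
     rcases hu with rfl|rfl|rfl|rfl|rfl|rfl|rfl|rfl|rfl|rfl|rfl|rfl <;> simp [Elist])

-- the identity orientation lies in the orbit list of any orientation t of (w,x,y,z)
lemma orbit_id {w x y z : Int} {t : Int × Int × Int × Int} (ht : t ∈ Elist w x y z) :
    (w,x,y,z) ∈ Elist t.1 t.2.1 t.2.2.1 t.2.2.2 := by
  simp only [Elist, List.mem_cons, List.not_mem_nil, or_false] at ht
  rcases ht with rfl|rfl|rfl|rfl|rfl|rfl|rfl|rfl|rfl|rfl|rfl|rfl <;> simp [Elist]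

-- some base orientation of a lies in any rotS-closed set meeting a's orbit
lemma exists_base_of_mem {w x y z : Int} {L : List (Int × Int × Int × Int)}
    (hclosed : ∀ t ∈ L, rotS t ∈ L) {t : Int × Int × Int × Int}
    (ha : t ∈ Elist w x y z) (hb : t ∈ L) : ∃ u ∈ Base4 w x y z, u ∈ L := by
  simp only [Elist, List.mem_cons, List.not_mem_nil, or_false] at ha
  rcases ha with rfl|rfl|rfl|rfl|rfl|rfl|rfl|rfl|rfl|rfl|rfl|rfl
  · exact ⟨(w,x,y,z), by simp [Base4], hb⟩
  · exact ⟨(w,x,y,z), by simp [Base4], hclosed _ (hclosed _ hb)⟩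
  · exact ⟨(w,x,y,z), by simp [Base4], hclosed _ hb⟩
  · exact ⟨(x,w,z,y), by simp [Base4], hb⟩
  · exact ⟨(x,w,z,y), by simp [Base4], hclosed _ (hclosed _ hb)⟩
  · exact ⟨(x,w,z,y), by simp [Base4], hclosed _ hb⟩
  · exact ⟨(y,w,x,z), by simp [Base4], hb⟩
  · exact ⟨(y,w,x,z), by simp [Base4], hclosed _ (hclosed _ hb)⟩
  · exact ⟨(y,w,x,z), by simp [Base4], hclosed _ hb⟩
  · exact ⟨(z,w,y,x), by simp [Base4], hb⟩
  · exact ⟨(z,w,y,x), by simp [Base4], hclosed _ (hclosed _ hb)⟩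
  · exact ⟨(z,w,y,x), by simp [Base4], hclosed _ hb⟩

lemma pv_ifOr (c b : Bool) : (if c = true then true else b) = (c || b) := by cases c <;> simp

-- A's 3-iteration rotation loop as an explicit 3-way disjunction
lemma pv_rot3 (p q r u v w : Int) :
    solveRot 3 [p,q,r] [u,v,w] = ([p,q,r] == [u,v,w] || ([p,q,r] == [v,w,u] || [p,q,r] == [w,u,v])) := by
  have hrot : ∀ x y z : Int, rotate_face [x,y,z] = [y,z,x] := fun _ _ _ => rfl
  simp only [solveRot, hrot, pv_ifOr, Bool.or_false]

-- one (i, j) cell of A is membership of a's base orientation among b's three j-rotations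
lemma pv_cell (x y p q r u v w : Int) :
    (x == y && solveRot 3 [p,q,r] [u,v,w]) =
    (([(y,u,v,w), (y,v,w,u), (y,w,u,v)] : List (Int × Int × Int × Int)).contains (x,p,q,r)) := by
  rw [pv_rot3, Bool.eq_iff_iff]
  simp only [List.contains_cons, List.contains_nil, Bool.or_false, Bool.and_eq_true,
    Bool.or_eq_true, beq_iff_eq, Prod.mk.injEq, List.cons.injEq, and_true]
  tauto

set_option maxHeartbeats 1000000 in
lemma A_norm (a b : List Int) :
    solve a b =
      if (Base4 (pvIdx a 0) (pvIdx a 1) (pvIdx a 2) (pvIdx a 3)).any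
          (fun t => (Elist (pvIdx b 0) (pvIdx b 1) (pvIdx b 2) (pvIdx b 3)).contains t)
      then 1 else 0 := by
  have hr4 : PySem.List.pyRange 0 4 1 = [0,1,2,3] := by decide
  simp only [solve, hr4, List.any_cons, List.any_nil, pvSides, pv_cell, Base4, Elist,
    List.contains_cons, List.contains_nil, Bool.or_false,
    show pvIdx face_mapping_a 0 = 1 from rfl, show pvIdx face_mapping_a 1 = 0 from rfl,
    show pvIdx face_mapping_a 2 = 0 from rfl, show pvIdx face_mapping_a 3 = 0 from rfl,
    show pvIdx face_mapping_b 0 = 2 from rfl, show pvIdx face_mapping_b 1 = 3 from rfl,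
    show pvIdx face_mapping_b 2 = 1 from rfl, show pvIdx face_mapping_b 3 = 2 from rfl,
    show pvIdx face_mapping_c 0 = 3 from rfl, show pvIdx face_mapping_c 1 = 2 from rfl,
    show pvIdx face_mapping_c 2 = 3 from rfl, show pvIdx face_mapping_c 3 = 1 from rfl]
  have hb : ∀ c d : Bool, c = d → (if c = true then (1:Int) else 0) = (if d = true then 1 else 0) :=
    fun c d h => by rw [h]
  apply hb
  ac_rfl

lemma pv_key (a b : List Int) : solve a b = solve_alt a b := by
  rw [A_norm, solve_alt, canon_eq a, canon_eq b]
  by_cases hc : (Base4 (pvIdx a 0) (pvIdx a 1) (pvIdx a 2) (pvIdx a 3)).any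
      (fun t => (Elist (pvIdx b 0) (pvIdx b 1) (pvIdx b 2) (pvIdx b 3)).contains t) = true
  · rw [if_pos hc, if_pos ?_]
    obtain ⟨t, htA, htB⟩ := List.any_eq_true.mp hc
    replace htB := List.contains_iff_mem.mp htB
    replace htA := base4_subset htA
    exact minFold_congr (fun u =>
      ⟨fun hu => orbit_subset htB u (orbit_subset (orbit_id htA) u hu),
       fun hu => orbit_subset htA u (orbit_subset (orbit_id htB) u hu)⟩)
  · rw [if_neg hc, if_neg ?_]
    intro hmin
    apply hc
    obtain ⟨ma, ea, hma, _⟩ := minE_spec (pvIdx a 0) (pvIdx a 1) (pvIdx a 2) (pvIdx a 3)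
    obtain ⟨mb, eb, hmb, _⟩ := minE_spec (pvIdx b 0) (pvIdx b 1) (pvIdx b 2) (pvIdx b 3)
    rw [ea, eb] at hmin
    obtain rfl : ma = mb := Option.some.inj hmin
    obtain ⟨u, hu, huB⟩ := exists_base_of_mem (fun t ht => rotS_mem ht) hma hmb
    exact List.any_eq_true.mpr ⟨u, hu, List.contains_iff_mem.mpr huB⟩

-- ===== VERDICT (by name: the statement is the Claim_ definition above) =====
theorem solve_spec : Claim_equal_solve := by
  intro a b _ _
  exact pv_key a b
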